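-- pv_equiv track=rewrite | github.com/PranavAngrish/meta | graders.py | _investigated_before_fix
-- ===== SOURCE A (Python) =====
-- _INVESTIGATION_ACTIONS = {
--     "investigate_logs", "check_metrics", "read_config",
--     "check_service_health", "run_diagnostic",
-- }
--
-- _ALIASES: dict[str, str] = {
--     # Database
--     "postgres": "postgres-primary",
--     "postgresql": "postgres-primary",
--     "postgres_primary": "postgres-primary",
--     "primary_db": "primary-db",
--     "primarydb": "primary-db",
--     "db": "postgres-primary",
--     # APIs / gateways
--     "api": "api-gateway",
--     "api_gateway": "api-gateway",
--     "apigw": "api-gateway",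
--     "gateway": "api-gateway",
--     # Auth
--     "auth": "auth-service",
--     "authentication": "auth-service",
--     # Order
--     "order": "order-service",
--     "orders": "order-service",
--     "order_service": "order-service",
--     # Inventory
--     "inventory": "inventory-service",
--     "inventory_service": "inventory-service",
--     # Payment
--     "payment": "payment-service",
--     "payments": "payment-service",
--     "payment_service": "payment-service",
--     # User
--     "user": "user-api",
--     "users": "user-api",
--     "user_api": "user-api",
--     "userapi": "user-api",
--     # Analytics
--     "analytics": "analytics-service",
--     "analytics_service": "analytics-service",
--     # Redis / cache
--     "redis": "redis-cache",
--     "cache": "redis-cache",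
--     "redis_cache": "redis-cache",
--     # Search
--     "search": "search-service",
--     "search_service": "search-service",
--     # Cert / TLS
--     "cert": "cert-manager",
--     "tls": "cert-manager",
--     "certmanager": "cert-manager",
--     "cert_manager": "cert-manager",
--     # Misc
--     "nginx": "nginx-lb",
--     "lb": "nginx-lb",
--     "loadbalancer": "nginx-lb",
-- }
--
-- def _normalise_svc(name: str) -> str:
--     """Lowercase, strip, normalise separators, apply alias map."""
--     n = name.lower().strip().replace("_", "-").replace(" ", "-")
--     return _ALIASES.get(n, n)
--
-- def _svc_match(submitted: str, correct: str) -> bool: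
--     """Return True if submitted service name matches the correct one (with aliases)."""
--     s = _normalise_svc(submitted)
--     c = _normalise_svc(correct)
--     if s == c:
--         return True
--     return s in c or c in s
--
-- def _investigated_before_fix(agent_actions: list[str], target_svc: str, fix_action: str) -> bool:
--     """Return True if agent investigated target_svc before applying the fix action."""
--     fix_index = None
--     for i, action_str in enumerate(agent_actions):
--         action_type = action_str.split("(")[0].strip()
--         svc = ""
--         if "(" in action_str and action_str.endswith(")"):
--             svc = action_str.split("(", 1)[1].rstrip(")")
--         if action_type == fix_action and _svc_match(svc, target_svc):
--             fix_index = i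
--             break
--     if fix_index is None:
--         return True  # Fix never applied — not a gate violation
--     for action_str in agent_actions[:fix_index]:
--         action_type = action_str.split("(")[0].strip()
--         svc = ""
--         if "(" in action_str and action_str.endswith(")"):
--             svc = action_str.split("(", 1)[1].rstrip(")")
--         if action_type in _INVESTIGATION_ACTIONS and _svc_match(svc, target_svc):
--             return True
--     return False
-- ===== SOURCE B (Python) =====
-- _INVESTIGATION_ACTIONS = (
--     "investigate_logs", "check_metrics", "read_config",
--     "check_service_health", "run_diagnostic",
-- )
--
-- # alias map inverted: one row per canonical service, listing every alias of it
-- _CANONICAL = [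
--     ("postgres-primary", ("postgres", "postgresql", "postgres_primary", "db")),
--     ("primary-db", ("primary_db", "primarydb")),
--     ("api-gateway", ("api", "api_gateway", "apigw", "gateway")),
--     ("auth-service", ("auth", "authentication")),
--     ("order-service", ("order", "orders", "order_service")),
--     ("inventory-service", ("inventory", "inventory_service")),
--     ("payment-service", ("payment", "payments", "payment_service")),
--     ("user-api", ("user", "users", "user_api", "userapi")),
--     ("analytics-service", ("analytics", "analytics_service")),
--     ("redis-cache", ("redis", "cache", "redis_cache")),
--     ("search-service", ("search", "search_service")),
--     ("cert-manager", ("cert", "tls", "certmanager", "cert_manager")),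
--     ("nginx-lb", ("nginx", "lb", "loadbalancer")),
-- ]
--
--
-- def _canon_lookup(n):
--     for target, alts in _CANONICAL:
--         if n in alts:
--             return target
--     return n
--
--
-- def _canon(name):
--     n = name.lower().strip().replace("_", "-").replace(" ", "-")
--     return _canon_lookup(n)
--
--
-- def _match_canon(submitted, y):
--     # y is the already-canonicalised target
--     x = _canon(submitted)
--     return x == y or x in y or y in x
--
--
-- def _parse(action_str):
--     head = action_str.split("(")[0].strip()
--     svc = ""
--     if "(" in action_str and action_str.endswith(")"):
--         svc = action_str.split("(", 1)[1].rstrip(")")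
--     return head, svc
--
--
-- def _investigated_before_fix(agent_actions, target_svc, fix_action):
--     # canonicalise the target once, parse each action once, and make a single scan
--     # carrying an 'investigated' flag that is returned the moment the fix is reached
--     y = _canon(target_svc)
--     investigated = False
--     for t, s in map(_parse, agent_actions):
--         if t == fix_action and _match_canon(s, y):
--             return investigated
--         if not investigated and t in _INVESTIGATION_ACTIONS and _match_canon(s, y):
--             investigated = True
--     return True
-- ===== Notes on version B (the rewrite author's own statement) =====
-- stated objective: simpler
-- what changed: Replaced A's two-pass scheme (find the index of the first matching fix action, then re-parse and rescan the prefix for an investigation) by a single scan over once-parsed (type, svc) pairs carrying an 'investigated' flag that is returned at the fix; the target service is canonicalised once up front and the alias dict is inverted into one row per canonical service.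
import Mathlib
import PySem

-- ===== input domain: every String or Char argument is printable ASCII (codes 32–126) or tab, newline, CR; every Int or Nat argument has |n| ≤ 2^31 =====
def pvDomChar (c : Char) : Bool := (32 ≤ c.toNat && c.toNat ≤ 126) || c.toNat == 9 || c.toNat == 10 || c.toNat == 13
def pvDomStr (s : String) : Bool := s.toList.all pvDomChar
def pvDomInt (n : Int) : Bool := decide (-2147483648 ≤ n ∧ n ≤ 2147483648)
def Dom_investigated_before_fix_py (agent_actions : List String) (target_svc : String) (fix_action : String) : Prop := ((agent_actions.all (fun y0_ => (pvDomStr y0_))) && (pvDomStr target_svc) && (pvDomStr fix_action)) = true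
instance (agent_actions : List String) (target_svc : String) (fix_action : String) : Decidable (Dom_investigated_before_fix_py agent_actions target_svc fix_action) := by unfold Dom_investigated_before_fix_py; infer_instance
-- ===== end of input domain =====

-- B replaces A's two-pass scheme (locate the fix index, then re-parse and rescan the prefix) by a
-- parse-once pipeline and a single scan carrying an 'investigated' flag, with the target canonicalised
-- once up front and the alias map inverted (one row per canonical service); objective: simpler.

-- ===== PORT A =====
def pvInvestigationActions : PySem.Set String := PySem.Set.ofList
  ["investigate_logs", "check_metrics", "read_config", "check_service_health", "run_diagnostic"]

def pvAliases : PySem.Dict String String := PySem.Dict.ofList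
  [("postgres", "postgres-primary"), ("postgresql", "postgres-primary"),
   ("postgres_primary", "postgres-primary"), ("primary_db", "primary-db"),
   ("primarydb", "primary-db"), ("db", "postgres-primary"),
   ("api", "api-gateway"), ("api_gateway", "api-gateway"), ("apigw", "api-gateway"),
   ("gateway", "api-gateway"),
   ("auth", "auth-service"), ("authentication", "auth-service"),
   ("order", "order-service"), ("orders", "order-service"), ("order_service", "order-service"),
   ("inventory", "inventory-service"), ("inventory_service", "inventory-service"),
   ("payment", "payment-service"), ("payments", "payment-service"), ("payment_service", "payment-service"),
   ("user", "user-api"), ("users", "user-api"), ("user_api", "user-api"), ("userapi", "user-api"),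
   ("analytics", "analytics-service"), ("analytics_service", "analytics-service"),
   ("redis", "redis-cache"), ("cache", "redis-cache"), ("redis_cache", "redis-cache"),
   ("search", "search-service"), ("search_service", "search-service"),
   ("cert", "cert-manager"), ("tls", "cert-manager"), ("certmanager", "cert-manager"),
   ("cert_manager", "cert-manager"),
   ("nginx", "nginx-lb"), ("lb", "nginx-lb"), ("loadbalancer", "nginx-lb")]

def pvNormaliseSvc (name : String) : String :=
  let n := PySem.Str.replace (PySem.Str.replace (PySem.Str.strip (PySem.Str.lower name)) "_" "-") " " "-"
  PySem.Dict.getD pvAliases n n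

def pvSvcMatch (submitted correct : String) : Bool :=
  let s := pvNormaliseSvc submitted
  let c := pvNormaliseSvc correct
  if s == c then true
  else PySem.Str.isIn s c || PySem.Str.isIn c s

-- action_str.split("(")[0].strip()
def pvActionType (action_str : String) : String :=
  PySem.Str.strip (((PySem.Str.split? action_str "(").getD []).headD "")

-- hand port of s.rstrip(")") (exact: drops every trailing ')')
def pvRstripParen (s : String) : String :=
  String.ofList ((s.toList.reverse.dropWhile (fun c => c == ')')).reverse)

-- svc = "" ; if "(" in action_str and action_str.endswith(")"): svc = action_str.split("(", 1)[1].rstrip(")")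
def pvSvcOf (action_str : String) : String :=
  if PySem.Str.isIn "(" action_str && PySem.Str.endswith action_str ")" then
    pvRstripParen (((PySem.Str.splitMax? action_str "(" 1).getD []).getD 1 "")
  else ""

-- first loop of A: enumerate with break, fix_index as Int counter
def pvFixLoop (l : List String) (i : Int) (target_svc fix_action : String) : Option Int :=
  match l with
  | [] => none
  | a :: rest =>
    if pvActionType a == fix_action && pvSvcMatch (pvSvcOf a) target_svc then some i
    else pvFixLoop rest (i + 1) target_svc fix_action

-- second loop of A over agent_actions[:fix_index], early return True
def pvInvLoop (l : List String) (target_svc : String) : Bool :=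
  match l with
  | [] => false
  | a :: rest =>
    if PySem.Set.contains pvInvestigationActions (pvActionType a) && pvSvcMatch (pvSvcOf a) target_svc then true
    else pvInvLoop rest target_svc

def investigated_before_fix_py (agent_actions : List String) (target_svc : String) (fix_action : String) : Bool :=
  match pvFixLoop agent_actions 0 target_svc fix_action with
  | none => true
  | some i => pvInvLoop (PySem.List.slice agent_actions none (some i)) target_svc

-- ===== PORT B =====
-- _INVESTIGATION_ACTIONS as the tuple Source B uses
def pvInvTuple : List String :=
  ["investigate_logs", "check_metrics", "read_config", "check_service_health", "run_diagnostic"]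

-- _CANONICAL: the alias map inverted, one row (canonical, aliases-of-it) per service
def pvCanonTable : List (String × List String) :=
  [("postgres-primary", ["postgres", "postgresql", "postgres_primary", "db"]),
   ("primary-db", ["primary_db", "primarydb"]),
   ("api-gateway", ["api", "api_gateway", "apigw", "gateway"]),
   ("auth-service", ["auth", "authentication"]),
   ("order-service", ["order", "orders", "order_service"]),
   ("inventory-service", ["inventory", "inventory_service"]),
   ("payment-service", ["payment", "payments", "payment_service"]),
   ("user-api", ["user", "users", "user_api", "userapi"]),
   ("analytics-service", ["analytics", "analytics_service"]),
   ("redis-cache", ["redis", "cache", "redis_cache"]),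
   ("search-service", ["search", "search_service"]),
   ("cert-manager", ["cert", "tls", "certmanager", "cert_manager"]),
   ("nginx-lb", ["nginx", "lb", "loadbalancer"])]

-- _canon_lookup: first row whose alias list contains n
def pvCanonLookup (n : String) : String :=
  match pvCanonTable.find? (fun g => g.2.contains n) with
  | some g => g.1
  | none => n

-- _canon: normalise, then look the name up in the inverted table
def pvCanon (name : String) : String :=
  let n := PySem.Str.replace (PySem.Str.replace (PySem.Str.strip (PySem.Str.lower name)) "_" "-") " " "-"
  pvCanonLookup n

-- _match_canon: y is the already-canonicalised target
def pvMatchCanon (submitted y : String) : Bool :=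
  let x := pvCanon submitted
  x == y || PySem.Str.isIn x y || PySem.Str.isIn y x

-- _parse: one action string to its (type, svc) pair
def pvParse (action_str : String) : String × String :=
  let head := PySem.Str.strip (((PySem.Str.split? action_str "(").getD []).headD "")
  let svc :=
    if PySem.Str.isIn "(" action_str && PySem.Str.endswith action_str ")" then
      pvRstripParen (((PySem.Str.splitMax? action_str "(" 1).getD []).getD 1 "")
    else ""
  (head, svc)

-- Source B's single scan over the parsed (type, svc) pairs, carrying the 'investigated' flag
def pvScan (pairs : List (String × String)) (investigated : Bool) (y fix_action : String) : Bool :=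
  match pairs with
  | [] => true
  | (t, s) :: rest =>
    if t == fix_action && pvMatchCanon s y then investigated
    else pvScan rest (if !investigated && (pvInvTuple.contains t && pvMatchCanon s y) then true else investigated) y fix_action

def investigated_before_fix_py_alt (agent_actions : List String) (target_svc : String) (fix_action : String) : Bool :=
  pvScan (agent_actions.map pvParse) false (pvCanon target_svc) fix_action

-- ===== PRECONDITION & SPEC =====
def Spec_investigated_before_fix_py (agent_actions : List String) (target_svc : String) (fix_action : String) (out : Bool) : Prop := out = investigated_before_fix_py_alt agent_actions target_svc fix_action
instance (agent_actions : List String) (target_svc : String) (fix_action : String) (out : Bool) : Decidable (Spec_investigated_before_fix_py agent_actions target_svc fix_action out) := by unfold Spec_investigated_before_fix_py; infer_instance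

-- ===== CLAIM (what is proved, stated in full; the proofs are below) =====
def Claim_equal_investigated_before_fix_py : Prop := ∀ (agent_actions : List String) (target_svc : String) (fix_action : String), Dom_investigated_before_fix_py agent_actions target_svc fix_action → Spec_investigated_before_fix_py agent_actions target_svc fix_action (investigated_before_fix_py agent_actions target_svc fix_action)

-- ===== LEMMAS AND PROOFS =====
-- every key of A's alias dict (helper for the lookup-equivalence lemma)
def pvAllKeys : List String :=
  ["postgres", "postgresql", "postgres_primary", "primary_db", "primarydb", "db",
   "api", "api_gateway", "apigw", "gateway", "auth", "authentication",
   "order", "orders", "order_service", "inventory", "inventory_service",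
   "payment", "payments", "payment_service", "user", "users", "user_api", "userapi",
   "analytics", "analytics_service", "redis", "cache", "redis_cache",
   "search", "search_service", "cert", "tls", "certmanager", "cert_manager",
   "nginx", "lb", "loadbalancer"]

set_option maxRecDepth 100000 in
set_option maxHeartbeats 2000000 in
theorem pvLookup_eq (n : String) :
    PySem.Dict.getD pvAliases n n = pvCanonLookup n := by
  by_cases h : n ∈ pvAllKeys
  · fin_cases h <;> decide
  · have hfind : pvCanonTable.find? (fun g => g.2.contains n) = none := by
      rw [List.find?_eq_none]
      intro g hg
      fin_cases hg <;>
        · simp only [List.contains_eq_mem, decide_eq_true_eq, List.mem_cons, List.not_mem_nil,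
            or_false, not_or]
          simp only [pvAllKeys, List.mem_cons, List.not_mem_nil, or_false, not_or] at h
          tauto
    have hkeys : pvAliases.keys = pvAllKeys := by decide
    have hcon : pvAliases.contains n = false := by
      rw [PySem.Dict.contains_eq_decide_mem_keys, hkeys]
      exact decide_eq_false h
    rw [PySem.Dict.getD_of_not_contains _ _ hcon]
    unfold pvCanonLookup
    rw [hfind]

set_option maxRecDepth 100000 in
set_option maxHeartbeats 2000000 in
theorem pvCanon_eq (name : String) : pvCanon name = pvNormaliseSvc name := by
  unfold pvCanon pvNormaliseSvc
  exact (pvLookup_eq _).symm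

theorem pvMatch_eq (a b : String) : pvMatchCanon a (pvCanon b) = pvSvcMatch a b := by
  unfold pvMatchCanon pvSvcMatch
  rw [pvCanon_eq, pvCanon_eq]
  by_cases h : pvNormaliseSvc a == pvNormaliseSvc b
  · simp [h]
  · simp [h]

theorem pvParse_fst (a : String) : (pvParse a).1 = pvActionType a := rfl

theorem pvParse_snd (a : String) : (pvParse a).2 = pvSvcOf a := rfl

theorem pvInvTuple_contains (t : String) :
    pvInvTuple.contains t = PySem.Set.contains pvInvestigationActions t := by
  have h : pvInvestigationActions = pvInvTuple := by decide
  rw [h, PySem.Set.contains]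

theorem pvFixLoop_nonneg {l : List String} {i j : Int} {t f : String}
    (h : pvFixLoop l i t f = some j) : i ≤ j := by
  induction l generalizing i with
  | nil => simp [pvFixLoop] at h
  | cons a rest ih =>
    unfold pvFixLoop at h
    split at h
    · simp at h; omega
    · have := ih h; omega

theorem pvFixLoop_shift (l : List String) (i : Int) (t f : String) :
    pvFixLoop l i t f = (pvFixLoop l 0 t f).map (· + i) := by
  induction l generalizing i with
  | nil => simp [pvFixLoop]
  | cons a rest ih =>
    unfold pvFixLoop
    split
    · simp
    · rw [ih (i + 1), ih (0 + 1)]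
      cases pvFixLoop rest 0 t f
      · simp
      · simp; omega

theorem pvInvLoop_cons (a : String) (l : List String) (t : String) :
    pvInvLoop (a :: l) t =
      ((PySem.Set.contains pvInvestigationActions (pvActionType a) && pvSvcMatch (pvSvcOf a) t) || pvInvLoop l t) := by
  conv_lhs => rw [pvInvLoop.eq_def]
  simp

theorem pvScan_eq (l : List String) (inv : Bool) (t f : String) :
    pvScan (l.map pvParse) inv (pvCanon t) f =
      match pvFixLoop l 0 t f with
      | none => true
      | some i => inv || pvInvLoop (PySem.List.slice l none (some i)) t := by
  induction l generalizing inv with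
  | nil => rfl
  | cons a rest ih =>
    simp only [List.map_cons]
    unfold pvScan pvFixLoop
    simp only [pvParse_fst, pvParse_snd, pvMatch_eq, pvInvTuple_contains]
    by_cases hf : (pvActionType a == f && pvSvcMatch (pvSvcOf a) t) = true
    · simp only [hf, if_true]
      rw [PySem.List.slice_to _ (by omega : (0:Int) ≤ 0)]
      simp [pvInvLoop]
    · simp only [hf, if_false, Bool.false_eq_true]
      rw [ih, pvFixLoop_shift rest (0 + 1)]
      cases hr : pvFixLoop rest 0 t f with
      | none => simp
      | some j =>
        have hj : (0:Int) ≤ j := pvFixLoop_nonneg hr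
        simp only [Option.map_some]
        have h01 : j + (0 + 1) = j + 1 := by ring
        rw [h01, PySem.List.slice_to _ (by omega : (0:Int) ≤ j + 1),
            PySem.List.slice_to _ hj]
        have : (j + 1).toNat = j.toNat + 1 := by omega
        rw [this]
        simp only [List.take_succ_cons, pvInvLoop_cons]
        cases inv <;>
          cases hc : (PySem.Set.contains pvInvestigationActions (pvActionType a) && pvSvcMatch (pvSvcOf a) t) <;>
            simp

-- ===== VERDICT (by name: the statement is the Claim_ definition above) =====
theorem investigated_before_fix_py_spec : Claim_equal_investigated_before_fix_py := by
  intro agent_actions target_svc fix_action _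
  unfold Spec_investigated_before_fix_py investigated_before_fix_py investigated_before_fix_py_alt
  rw [pvScan_eq]
  cases pvFixLoop agent_actions 0 target_svc fix_action <;> simp
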